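-- pv_equiv track=rewrite | github.com/Nidhood/Algorithm_analysis | taller_2/taller_2/iterative_solution.py | calculo_intersecciones
-- ===== SOURCE A (Python) =====
-- def calculo_intersecciones(S):
--     n = len(S)
--     I = []
--
--     # Iteramos sobre los rectangulos:
--     for i in range(n):
--
--         # Definimos el espacio del rectangulo i:
--         x_u_i, y_u_i = S[i][0]
--         x_d_i, y_d_i = S[i][1]
--
--         # Comparamos con los otros rectangulos:
--         for j in range(i + 1, n):
--
--             # Definimos el espacio del rectángulo j:
--             x_u_j, y_u_j = S[j][0]
--             x_d_j, y_d_j = S[j][1]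
--
--             # Conseguimos las coordenadas del rectangulo interseccion:
--             x_izq = max(x_u_i, x_u_j)
--             x_der = min(x_d_i, x_d_j)
--             y_arr = min(y_u_i, y_u_j)
--             y_aba = max(y_d_i, y_d_j)
--
--             if x_izq < x_der and y_aba < y_arr:
--
--                 # Obtenemos el largo del rectangulo interseccion:
--                 largo = x_der - x_izq
--
--                 # Obtenemos el ancho del rectangulo interseccion:
--                 ancho = y_arr - y_aba
--
--                 # Calculamos el area del rectangulo interseccion:
--                 area = largo * ancho
--                 I.append(area)
--             # end if
--         # end for
--     # end for
--     return I
-- ===== SOURCE B (Python) =====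
-- def calculo_intersecciones(S):
--     # Structural pass over suffixes: peel the first rectangle, compare it with
--     # the remaining tail, repeat on the tail (no index arithmetic).
--     I = []
--     tail = list(S)
--     while tail:
--         (x_u, y_u), (x_d, y_d) = tail[0]
--         tail = tail[1:]
--         for (x_u2, y_u2), (x_d2, y_d2) in tail:
--             w = min(x_d, x_d2) - max(x_u, x_u2)
--             h = min(y_u, y_u2) - max(y_d, y_d2)
--             if w > 0 and h > 0:
--                 I.append(w * h)
--     return I
-- ===== Notes on version B (the rewrite author's own statement) =====
-- stated objective: alternative
-- what changed: Replaces the double index loop with S[i]/S[j] subscripting by a structural pass over list suffixes (peel head, compare with tail, recurse on tail), testing positivity of the width/height differences instead of comparing the coordinate extrema.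
import Mathlib
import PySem

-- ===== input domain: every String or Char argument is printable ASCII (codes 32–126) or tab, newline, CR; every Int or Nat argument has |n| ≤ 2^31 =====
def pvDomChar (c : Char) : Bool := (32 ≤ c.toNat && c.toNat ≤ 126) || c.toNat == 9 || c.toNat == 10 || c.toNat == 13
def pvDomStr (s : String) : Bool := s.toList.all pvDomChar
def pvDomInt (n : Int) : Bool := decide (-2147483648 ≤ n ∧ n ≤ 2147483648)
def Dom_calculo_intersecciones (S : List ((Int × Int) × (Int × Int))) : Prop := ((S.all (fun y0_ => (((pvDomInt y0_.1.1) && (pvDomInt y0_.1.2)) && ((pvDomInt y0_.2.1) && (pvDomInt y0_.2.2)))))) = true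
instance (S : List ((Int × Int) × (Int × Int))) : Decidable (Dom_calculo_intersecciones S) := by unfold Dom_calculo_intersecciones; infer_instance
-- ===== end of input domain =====

-- B replaces A's double index loop (S[i]/S[j] over ranges) by a structural pass
-- over list suffixes; same asymptotic cost, alternative decomposition.


-- ===== PORT A =====
def calculo_intersecciones (S : List ((Int × Int) × (Int × Int))) : List Int :=
  let n : Int := (S.length : Int)
  (PySem.List.pyRange 0 n 1).foldl (fun I i =>
    let ri := PySem.List.pyGetD S i ((0, 0), (0, 0))
    (PySem.List.pyRange (i + 1) n 1).foldl (fun I j =>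
      let rj := PySem.List.pyGetD S j ((0, 0), (0, 0))
      let x_izq := max ri.1.1 rj.1.1
      let x_der := min ri.2.1 rj.2.1
      let y_arr := min ri.1.2 rj.1.2
      let y_aba := max ri.2.2 rj.2.2
      if x_izq < x_der ∧ y_aba < y_arr then
        I ++ [(x_der - x_izq) * (y_arr - y_aba)]
      else I) I) []

-- ===== PORT B =====
-- the 'while tail:' loop of Source B: peel the head, fold its row into I, continue on the tail
def pvAltLoop : List ((Int × Int) × (Int × Int)) → List Int → List Int
  | [], I => I
  | r :: t, I =>
      pvAltLoop t (t.foldl (fun acc s =>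
        let w := min r.2.1 s.2.1 - max r.1.1 s.1.1
        let h := min r.1.2 s.1.2 - max r.2.2 s.2.2
        if 0 < w ∧ 0 < h then acc ++ [w * h] else acc) I)

def calculo_intersecciones_alt (S : List ((Int × Int) × (Int × Int))) : List Int :=
  pvAltLoop S []

-- ===== PRECONDITION & SPEC =====
def Spec_calculo_intersecciones (S : List ((Int × Int) × (Int × Int))) (out : List Int) : Prop := out = calculo_intersecciones_alt S
instance (S : List ((Int × Int) × (Int × Int))) (out : List Int) : Decidable (Spec_calculo_intersecciones S out) := by unfold Spec_calculo_intersecciones; infer_instance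

-- ===== CLAIM (what is proved, stated in full; the proofs are below) =====
def Claim_equal_calculo_intersecciones : Prop := ∀ (S : List ((Int × Int) × (Int × Int))), Dom_calculo_intersecciones S → Spec_calculo_intersecciones S (calculo_intersecciones S)

-- ===== LEMMAS AND PROOFS =====

-- the row bodies of the two ports agree (same condition and value, by arithmetic)
lemma pvRow_body_eq (r : (Int × Int) × (Int × Int)) :
    ∀ (acc : List Int) (s : (Int × Int) × (Int × Int)),
      (if max r.1.1 s.1.1 < min r.2.1 s.2.1 ∧ max r.2.2 s.2.2 < min r.1.2 s.1.2 then
        acc ++ [(min r.2.1 s.2.1 - max r.1.1 s.1.1) * (min r.1.2 s.1.2 - max r.2.2 s.2.2)]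
      else acc)
      = (fun acc s =>
          let w := min r.2.1 s.2.1 - max r.1.1 s.1.1
          let h := min r.1.2 s.1.2 - max r.2.2 s.2.2
          if 0 < w ∧ 0 < h then acc ++ [w * h] else acc) acc s := by
  intro acc s
  simp only []
  by_cases hx : max r.1.1 s.1.1 < min r.2.1 s.2.1 ∧ max r.2.2 s.2.2 < min r.1.2 s.1.2
  · rw [if_pos hx, if_pos (by omega)]
  · rw [if_neg hx, if_neg (by omega)]

-- the outer index loop of A, from index a on, is B's suffix loop on S.drop a
lemma pvMain (S : List ((Int × Int) × (Int × Int))) :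
    ∀ (d : Nat) (a : Int) (I : List Int), 0 ≤ a → d = S.length - a.toNat →
      (PySem.List.pyRange a (S.length : Int) 1).foldl (fun I i =>
        let ri := PySem.List.pyGetD S i ((0, 0), (0, 0))
        (PySem.List.pyRange (i + 1) (S.length : Int) 1).foldl (fun I j =>
          let rj := PySem.List.pyGetD S j ((0, 0), (0, 0))
          let x_izq := max ri.1.1 rj.1.1
          let x_der := min ri.2.1 rj.2.1
          let y_arr := min ri.1.2 rj.1.2
          let y_aba := max ri.2.2 rj.2.2
          if x_izq < x_der ∧ y_aba < y_arr then
            I ++ [(x_der - x_izq) * (y_arr - y_aba)]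
          else I) I) I
      = pvAltLoop (S.drop a.toNat) I := by
  intro d
  induction d with
  | zero =>
    intro a I ha hd
    have hlen : (S.length : Int) ≤ a := by omega
    have hdrop : S.drop a.toNat = [] := List.drop_eq_nil_of_le (by omega)
    rw [PySem.List.pyRange_one_eq_nil hlen, hdrop]
    rfl
  | succ d ih =>
    intro a I ha hd
    have hlt : a < (S.length : Int) := by omega
    have hbound : a.toNat < S.length := by omega
    rw [PySem.List.pyRange_one_cons hlt, List.foldl_cons]
    have hdrop : S.drop a.toNat = S[a.toNat] :: S.drop (a.toNat + 1) :=
      (List.getElem_cons_drop hbound).symm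
    have hget : PySem.List.pyGetD S a ((0, 0), (0, 0)) = S[a.toNat] := by
      exact PySem.List.pyGetD_eq_getElem S _ ha hlt
    have htn : (a + 1).toNat = a.toNat + 1 := by omega
    have hinner :
        (PySem.List.pyRange (a + 1) (S.length : Int) 1).foldl (fun I j =>
          let rj := PySem.List.pyGetD S j ((0, 0), (0, 0))
          let x_izq := max S[a.toNat].1.1 rj.1.1
          let x_der := min S[a.toNat].2.1 rj.2.1
          let y_arr := min S[a.toNat].1.2 rj.1.2
          let y_aba := max S[a.toNat].2.2 rj.2.2
          if x_izq < x_der ∧ y_aba < y_arr then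
            I ++ [(x_der - x_izq) * (y_arr - y_aba)]
          else I) I
        = (S.drop (a.toNat + 1)).foldl (fun acc s =>
            let w := min S[a.toNat].2.1 s.2.1 - max S[a.toNat].1.1 s.1.1
            let h := min S[a.toNat].1.2 s.1.2 - max S[a.toNat].2.2 s.2.2
            if 0 < w ∧ 0 < h then acc ++ [w * h] else acc) I := by
      have h1 := PySem.List.foldl_pyRange_pyGetD' S ((0, 0), (0, 0))
        (fun I rj =>
          if max S[a.toNat].1.1 rj.1.1 < min S[a.toNat].2.1 rj.2.1 ∧
             max S[a.toNat].2.2 rj.2.2 < min S[a.toNat].1.2 rj.1.2 then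
            I ++ [(min S[a.toNat].2.1 rj.2.1 - max S[a.toNat].1.1 rj.1.1) *
                  (min S[a.toNat].1.2 rj.1.2 - max S[a.toNat].2.2 rj.2.2)]
          else I) I (a := a + 1) (by omega)
      rw [htn] at h1
      exact h1.trans (PySem.List.foldl_congr_mem (S.drop (a.toNat + 1)) _ _ I
        (fun acc s _ => pvRow_body_eq S[a.toNat] acc s))
    simp only [hget, hinner, hdrop, pvAltLoop]
    rw [← htn]
    exact ih (a + 1) _ (by omega) (by omega)

-- ===== VERDICT (by name: the statement is the Claim_ definition above) =====
theorem calculo_intersecciones_spec : Claim_equal_calculo_intersecciones := by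
  intro S _
  unfold Spec_calculo_intersecciones calculo_intersecciones calculo_intersecciones_alt
  have := pvMain S (S.length - (0:Int).toNat) 0 [] le_rfl rfl
  simpa using this
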